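-- pv_equiv track=rewrite | github.com/dev-connor/Algorithm | LeetCode/Medium/1578-minimum-time-to-make-rope-colorful/1578-minimum-time-to-make-rope-colorful.py | minCost
-- ===== SOURCE A (Python) =====
-- import heapq
-- from typing import List
--
-- def minCost(colors: str, neededTime: List[int]) -> int:
--     answer = 0
--     n = len(colors)
--
--     i = 0
--     while i < n-1:
--         h = []
--         if colors[i] == colors[i+1]:
--             heapq.heappush(h,neededTime[i])
--             heapq.heappush(h,neededTime[i+1])
--             i += 1
--
--             while i+1 < n and colors[i] == colors[i+1]:
--                 heapq.heappush(h,neededTime[i+1])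
--                 i += 1
--                 if i >= n-1:
--                     break
--             while len(h) > 1:
--                 answer += heapq.heappop(h)
--             i += 1
--
--         else:
--             i += 1
--
--     return answer
-- ===== SOURCE B (Python) =====
-- def minCost(colors, neededTime):
--     total = 0
--     maxv = None  # max cost seen so far in the current run of equal colors
--     for i in range(1, len(colors)):
--         if colors[i] == colors[i - 1]:
--             if maxv is None:
--                 maxv = neededTime[i - 1]
--             t = neededTime[i]
--             total += min(maxv, t)
--             maxv = max(maxv, t)
--         else:
--             maxv = None
--     return total
-- ===== Notes on version B (the rewrite author's own statement) =====
-- stated objective: faster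
-- what changed: Replaced the per-group binary heap (push every cost, pop all but the max) by a single forward pass that keeps only the running maximum of the current run and adds min(running max, current cost) at each duplicate.
import Mathlib
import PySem

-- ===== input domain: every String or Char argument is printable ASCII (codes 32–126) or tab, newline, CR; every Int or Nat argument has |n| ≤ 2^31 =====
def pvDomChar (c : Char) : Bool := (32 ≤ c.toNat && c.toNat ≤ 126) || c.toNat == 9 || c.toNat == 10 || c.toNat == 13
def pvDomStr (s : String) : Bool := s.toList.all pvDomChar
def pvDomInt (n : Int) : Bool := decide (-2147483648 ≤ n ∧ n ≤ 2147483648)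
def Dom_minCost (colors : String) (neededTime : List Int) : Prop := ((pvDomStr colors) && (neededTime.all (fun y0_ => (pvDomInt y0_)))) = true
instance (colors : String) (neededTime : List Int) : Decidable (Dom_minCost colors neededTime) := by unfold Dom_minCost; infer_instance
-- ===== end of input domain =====

-- B replaces A's per-group heap by one linear pass tracking the run maximum; return values agree on Pre_ (no IndexError).

-- ===== PORT A =====
-- heapq heap modelled as an ascending sorted list: heappush = ordered insert, heappop = take the head (the minimum); exact for what A does with it.
def pvInsort (x : Int) : List Int → List Int
  | [] => [x]
  | y :: ys => if x ≤ y then x :: y :: ys else y :: pvInsort x ys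

-- 'while len(h) > 1: answer += heappop(h)'
def pvDrain (answer : Int) : List Int → Int
  | [] => answer
  | [_] => answer
  | x :: y :: t => pvDrain (answer + x) (y :: t)

-- inner 'while i+1 < n and colors[i] == colors[i+1]: push t[i+1]; i += 1; if i >= n-1: break'.
-- The Nat fuel only makes the loop total for Lean; it is never exhausted at the fuel minCost supplies.
def pvInner (cs : List Char) (ts : List Int) : Nat → List Int → Nat → List Int × Nat
  | 0, h, i => (h, i)
  | fuel+1, h, i =>
    if i + 1 < cs.length ∧ cs.getD i ' ' = cs.getD (i+1) ' ' then
      let h' := pvInsort (ts.getD (i+1) 0) h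
      if i + 1 ≥ cs.length - 1 then (h', i+1) else pvInner cs ts fuel h' (i+1)
    else (h, i)

-- outer 'while i < n-1' (same fuel discipline)
def pvOuter (cs : List Char) (ts : List Int) : Nat → Int → Nat → Int
  | 0, answer, _ => answer
  | fuel+1, answer, i =>
    if i < cs.length - 1 then
      if cs.getD i ' ' = cs.getD (i+1) ' ' then
        let r := pvInner cs ts cs.length (pvInsort (ts.getD (i+1) 0) (pvInsort (ts.getD i 0) [])) (i+1)
        pvOuter cs ts fuel (pvDrain answer r.1) (r.2 + 1)
      else pvOuter cs ts fuel answer (i+1)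
    else answer

def minCost (colors : String) (neededTime : List Int) : Int :=
  pvOuter colors.toList neededTime colors.toList.length 0 0

-- ===== PORT B =====
-- 'for i in range(1, len(colors))' with state (maxv : Option Int, total); same fuel discipline
def pvBLoop (cs : List Char) (ts : List Int) : Nat → Nat → Option Int → Int → Int
  | 0, _, _, total => total
  | fuel+1, i, maxv, total =>
    if i < cs.length then
      if cs.getD i ' ' = cs.getD (i-1) ' ' then
        let m := maxv.getD (ts.getD (i-1) 0)
        let t := ts.getD i 0
        pvBLoop cs ts fuel (i+1) (some (max m t)) (total + min m t)
      else pvBLoop cs ts fuel (i+1) none total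
    else total

def minCost_alt (colors : String) (neededTime : List Int) : Int :=
  pvBLoop colors.toList neededTime colors.toList.length 1 none 0

-- ===== PRECONDITION & SPEC =====
-- Pre_ excludes exactly the inputs where Python A raises IndexError: an adjacent equal pair of
-- colors whose costs lie beyond the end of neededTime (B raises there too).
def Pre_minCost (colors : String) (neededTime : List Int) : Prop :=
  ∀ i < colors.length, (i + 1 < colors.length ∧ colors.toList.getD i ' ' = colors.toList.getD (i+1) ' ') → i + 1 < neededTime.length
instance (colors : String) (neededTime : List Int) : Decidable (Pre_minCost colors neededTime) := by unfold Pre_minCost; infer_instance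

def pvWitness_minCost : String × List Int := ("aab", [1, 2, 3])

def Spec_minCost (colors : String) (neededTime : List Int) (out : Int) : Prop := out = minCost_alt colors neededTime
instance (colors : String) (neededTime : List Int) (out : Int) : Decidable (Spec_minCost colors neededTime out) := by unfold Spec_minCost; infer_instance

-- ===== CLAIM (what is proved, stated in full; the proofs are below) =====
def Claim_equal_minCost : Prop := ∀ (colors : String) (neededTime : List Int), Dom_minCost colors neededTime → Pre_minCost colors neededTime → Spec_minCost colors neededTime (minCost colors neededTime)

-- ===== LEMMAS AND PROOFS =====

-- last element of a nonempty list (0 on []), avoiding getLastD's default plumbing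
def pvLast : List Int → Int
  | [] => 0
  | [x] => x
  | _ :: y :: t => pvLast (y :: t)

theorem pvLast_cons (y : Int) (l : List Int) (hne : l ≠ []) : pvLast (y :: l) = pvLast l := by
  cases l with
  | nil => exact absurd rfl hne
  | cons z zs => simp [pvLast]

theorem pvInsort_ne_nil (x : Int) (h : List Int) : pvInsort x h ≠ [] := by
  cases h with
  | nil => simp [pvInsort]
  | cons y ys => simp only [pvInsort]; split <;> simp

theorem pvInsort_sum (x : Int) (h : List Int) : (pvInsort x h).sum = x + h.sum := by
  induction h with
  | nil => simp [pvInsort]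
  | cons y ys ih =>
    simp only [pvInsort]
    split
    · simp
    · simp [ih]; ring

theorem pvInsort_mem (x b : Int) (h : List Int) : b ∈ pvInsort x h ↔ b = x ∨ b ∈ h := by
  induction h with
  | nil => simp [pvInsort]
  | cons y ys ih =>
    simp only [pvInsort]
    split
    · simp [or_assoc, or_comm]
    · simp [ih]; tauto

theorem pvInsort_pairwise (x : Int) (h : List Int) (hp : h.Pairwise (· ≤ ·)) :
    (pvInsort x h).Pairwise (· ≤ ·) := by
  induction h with
  | nil => simp [pvInsort]
  | cons y ys ih =>
    rcases List.pairwise_cons.mp hp with ⟨hy, hys⟩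
    simp only [pvInsort]
    split
    · rename_i hxy
      refine List.pairwise_cons.mpr ⟨?_, hp⟩
      intro b hb
      rcases List.mem_cons.mp hb with hb | hb
      · omega
      · exact le_trans hxy (hy b hb)
    · rename_i hxy
      refine List.pairwise_cons.mpr ⟨?_, ih hys⟩
      intro b hb
      rcases (pvInsort_mem x b ys).mp hb with hb | hb
      · omega
      · exact hy b hb

theorem pvHead_le_last (ys : List Int) : ∀ y : Int, (y :: ys).Pairwise (· ≤ ·) → y ≤ pvLast (y :: ys) := by
  induction ys with
  | nil => intro y _; simp [pvLast]
  | cons z zs ih =>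
    intro y hp
    rcases List.pairwise_cons.mp hp with ⟨hy, hzs⟩
    have h1 : y ≤ z := hy z (by simp)
    have h2 := ih z hzs
    simpa [pvLast] using le_trans h1 h2

theorem pvInsort_last (x : Int) (h : List Int) (hp : h.Pairwise (· ≤ ·)) (hne : h ≠ []) :
    pvLast (pvInsort x h) = max x (pvLast h) := by
  induction h with
  | nil => exact absurd rfl hne
  | cons y ys ih =>
    cases ys with
    | nil =>
      simp only [pvInsort]
      split <;> simp [pvLast] <;> omega
    | cons z zs =>
      rcases List.pairwise_cons.mp hp with ⟨hy, hzs⟩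
      rw [pvInsort]
      split
      · rename_i hxy
        have hle : y ≤ pvLast (y :: z :: zs) := pvHead_le_last (z :: zs) y hp
        rw [pvLast_cons x (y :: z :: zs) (by simp)]
        omega
      · rename_i hxy
        rw [pvLast_cons y _ (pvInsort_ne_nil x (z :: zs)), ih hzs (by simp),
            pvLast_cons y (z :: zs) (by simp)]

theorem pvDrain_eq (h : List Int) : ∀ a : Int, h ≠ [] → pvDrain a h = a + h.sum - pvLast h := by
  induction h with
  | nil => intro a hne; exact absurd rfl hne
  | cons x t ih =>
    intro a _
    cases t with
    | nil => simp [pvDrain, pvLast]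
    | cons y t' =>
      have := ih (a + x) (by simp)
      simp only [pvDrain, pvLast] at *
      rw [this]; simp; ring

theorem pvInner_ge (cs : List Char) (ts : List Int) :
    ∀ (f : Nat) (h : List Int) (i : Nat), i ≤ (pvInner cs ts f h i).2 := by
  intro f
  induction f with
  | zero => intro h i; simp [pvInner]
  | succ f ih =>
    intro h i
    simp only [pvInner]
    split
    · split
      · simp
      · exact le_trans (Nat.le_succ i) (ih _ (i+1))
    · simp

theorem pvInner_fuel (cs : List Char) (ts : List Int) :
    ∀ (f g : Nat) (h : List Int) (k : Nat), cs.length ≤ k + 1 + f → cs.length ≤ k + 1 + g →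
      pvInner cs ts f h k = pvInner cs ts g h k := by
  intro f
  induction f with
  | zero =>
    intro g h k hf hg
    cases g with
    | zero => rfl
    | succ g =>
      simp only [pvInner]
      rw [if_neg (by omega)]
  | succ f ih =>
    intro g h k hf hg
    cases g with
    | zero =>
      simp only [pvInner]
      rw [if_neg (by omega)]
    | succ g =>
      simp only [pvInner]
      by_cases hc : k + 1 < cs.length ∧ cs.getD k ' ' = cs.getD (k+1) ' '
      · rw [if_pos hc, if_pos hc]
        by_cases hb : k + 1 ≥ cs.length - 1
        · rw [if_pos hb, if_pos hb]
        · rw [if_neg hb, if_neg hb]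
          exact ih g _ (k+1) (by omega) (by omega)
      · rw [if_neg hc, if_neg hc]

theorem pvOuter_fuel (cs : List Char) (ts : List Int) :
    ∀ (f g : Nat) (a : Int) (i : Nat), cs.length ≤ i + 1 + f → cs.length ≤ i + 1 + g →
      pvOuter cs ts f a i = pvOuter cs ts g a i := by
  intro f
  induction f with
  | zero =>
    intro g a i hf hg
    cases g with
    | zero => rfl
    | succ g =>
      simp only [pvOuter]
      rw [if_neg (by omega)]
  | succ f ih =>
    intro g a i hf hg
    cases g with
    | zero =>
      simp only [pvOuter]
      rw [if_neg (by omega)]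
    | succ g =>
      simp only [pvOuter]
      by_cases hi : i < cs.length - 1
      · rw [if_pos hi, if_pos hi]
        by_cases hd : cs.getD i ' ' = cs.getD (i+1) ' '
        · rw [if_pos hd, if_pos hd]
          have hge := pvInner_ge cs ts cs.length (pvInsort (ts.getD (i+1) 0) (pvInsort (ts.getD i 0) [])) (i+1)
          exact ih g _ _ (by omega) (by omega)
        · rw [if_neg hd, if_neg hd]
          exact ih g a (i+1) (by omega) (by omega)
      · rw [if_neg hi, if_neg hi]

theorem pvBLoop_fuel (cs : List Char) (ts : List Int) :
    ∀ (f g : Nat) (i : Nat) (mv : Option Int) (tot : Int), cs.length ≤ i + f → cs.length ≤ i + g →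
      pvBLoop cs ts f i mv tot = pvBLoop cs ts g i mv tot := by
  intro f
  induction f with
  | zero =>
    intro g i mv tot hf hg
    cases g with
    | zero => rfl
    | succ g =>
      simp only [pvBLoop]
      rw [if_neg (by omega)]
  | succ f ih =>
    intro g i mv tot hf hg
    cases g with
    | zero =>
      simp only [pvBLoop]
      rw [if_neg (by omega)]
    | succ g =>
      simp only [pvBLoop]
      by_cases hi : i < cs.length
      · rw [if_pos hi, if_pos hi]
        by_cases hd : cs.getD i ' ' = cs.getD (i-1) ' '
        · rw [if_pos hd, if_pos hd]
          exact ih g (i+1) _ _ (by omega) (by omega)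
        · rw [if_neg hd, if_neg hd]
          exact ih g (i+1) none tot (by omega) (by omega)
      · rw [if_neg hi, if_neg hi]

theorem pvMainAux (cs : List Char) (ts : List Int) : ∀ m : Nat,
    (∀ k h a, cs.length - k = m → h.Pairwise (· ≤ ·) → h ≠ [] →
      pvBLoop cs ts (cs.length + 1) (k+1) (some (pvLast h)) (a + h.sum - pvLast h)
        = pvOuter cs ts (cs.length + 1) (pvDrain a (pvInner cs ts cs.length h k).1) ((pvInner cs ts cs.length h k).2 + 1))
    ∧ (∀ i a, cs.length - i = m → pvOuter cs ts (cs.length + 1) a i = pvBLoop cs ts (cs.length + 1) (i+1) none a) := by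
  intro m
  induction m using Nat.strong_induction_on with
  | _ m IH =>
    constructor
    · -- the run lemma
      intro k h a hm hp hne
      rw [pvInner_fuel cs ts cs.length (cs.length + 1) h k (by omega) (by omega)]
      rw [pvInner]
      by_cases hc : k + 1 < cs.length ∧ cs.getD k ' ' = cs.getD (k+1) ' '
      · rw [if_pos hc]
        simp only []
        set t := ts.getD (k+1) 0 with ht
        have hsum := pvInsort_sum t h
        have hlast := pvInsort_last t h hp hne
        have hstep : pvBLoop cs ts (cs.length + 1) (k+1) (some (pvLast h)) (a + h.sum - pvLast h)
            = pvBLoop cs ts (cs.length + 1) (k+2) (some (pvLast (pvInsort t h))) (a + (pvInsort t h).sum - pvLast (pvInsort t h)) := by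
          rw [pvBLoop, if_pos hc.1]
          have hdd : cs.getD (k+1) ' ' = cs.getD (k+1-1) ' ' := by
            simpa using hc.2.symm
          rw [if_pos hdd]
          simp only [Option.getD_some]
          have h1 : max (pvLast h) t = pvLast (pvInsort t h) := by omega
          have h2 : a + h.sum - pvLast h + min (pvLast h) t
              = a + (pvInsort t h).sum - pvLast (pvInsort t h) := by omega
          rw [h1, h2]
          exact pvBLoop_fuel cs ts cs.length (cs.length + 1) (k+1+1) _ _ (by omega) (by omega)
        by_cases hb : k + 1 ≥ cs.length - 1
        · rw [if_pos hb]
          simp only []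
          rw [pvOuter, if_neg (show ¬ (k+1+1 < cs.length - 1) by omega)]
          rw [hstep, pvBLoop, if_neg (show ¬ (k+2 < cs.length) by omega)]
          rw [pvDrain_eq _ a (pvInsort_ne_nil t h)]
        · rw [if_neg hb]
          rw [hstep]
          exact (IH (cs.length - (k+1)) (by omega)).1 (k+1) (pvInsort t h) a rfl
            (pvInsort_pairwise t h hp) (pvInsort_ne_nil t h)
      · rw [if_neg hc]
        simp only []
        rw [pvDrain_eq h a hne]
        by_cases hn : k + 1 < cs.length
        · have hneq : ¬ cs.getD k ' ' = cs.getD (k+1) ' ' := fun he => hc ⟨hn, he⟩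
          have hne2 : ¬ cs.getD (k+1) ' ' = cs.getD (k+1-1) ' ' := by
            simp only [Nat.add_sub_cancel]
            exact fun he => hneq he.symm
          rw [pvBLoop, if_pos hn, if_neg hne2]
          rw [pvBLoop_fuel cs ts cs.length (cs.length + 1) (k+1+1) none _ (by omega) (by omega)]
          by_cases ho : k + 1 < cs.length - 1
          · rw [(IH (cs.length - (k+1)) (by omega)).2 (k+1) (a + h.sum - pvLast h) rfl]
          · rw [pvOuter, if_neg ho, pvBLoop, if_neg (show ¬ (k+1+1 < cs.length) by omega)]
        · rw [pvBLoop, if_neg (show ¬ (k+1 < cs.length) by omega),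
              pvOuter, if_neg (show ¬ (k+1 < cs.length - 1) by omega)]
    · -- the main loop alignment
      intro i a hm
      rw [pvOuter]
      by_cases hi : i < cs.length - 1
      · rw [if_pos hi]
        by_cases hd : cs.getD i ' ' = cs.getD (i+1) ' '
        · rw [if_pos hd]
          simp only []
          set t0 := ts.getD i 0 with ht0
          set t1 := ts.getD (i+1) 0 with ht1
          set h0 := pvInsort t1 (pvInsort t0 []) with hh0
          have hge := pvInner_ge cs ts cs.length h0 (i+1)
          rw [pvOuter_fuel cs ts cs.length (cs.length + 1)
                (pvDrain a (pvInner cs ts cs.length h0 (i+1)).1)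
                ((pvInner cs ts cs.length h0 (i+1)).2 + 1) (by omega) (by omega)]
          have hp0 : (pvInsort t0 []).Pairwise (· ≤ ·) := pvInsort_pairwise t0 [] (by simp)
          have hrun := (IH (cs.length - (i+1)) (by omega)).1 (i+1) h0 a rfl
            (pvInsort_pairwise t1 _ hp0) (pvInsort_ne_nil t1 _)
          rw [← hrun]
          have hl0 : pvLast (pvInsort t0 []) = t0 := by simp [pvInsort, pvLast]
          have hs0 : (pvInsort t0 []).sum = t0 := by simp [pvInsort]
          have hl : pvLast h0 = max t1 t0 := by
            rw [hh0, pvInsort_last t1 _ hp0 (pvInsort_ne_nil t0 []), hl0]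
          have hs : h0.sum = t1 + t0 := by
            rw [hh0, pvInsort_sum, hs0]
          rw [hl, hs]
          have hrhs : pvBLoop cs ts (cs.length + 1) (i+1) none a
              = pvBLoop cs ts (cs.length + 1) (i+1+1) (some (max t0 t1)) (a + min t0 t1) := by
            rw [pvBLoop, if_pos (show i + 1 < cs.length by omega)]
            rw [if_pos (show cs.getD (i+1) ' ' = cs.getD (i+1-1) ' ' by simpa using hd.symm)]
            simp only [Option.getD_none, Nat.add_sub_cancel, ← ht0, ← ht1]
            exact pvBLoop_fuel cs ts cs.length (cs.length + 1) (i+1+1) _ _ (by omega) (by omega)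
          rw [hrhs]
          have h1 : max t1 t0 = max t0 t1 := by omega
          rw [h1]
          have h2 : a + (t1 + t0) - max t0 t1 = a + min t0 t1 := by omega
          rw [h2]
        · rw [if_neg hd]
          rw [pvOuter_fuel cs ts cs.length (cs.length + 1) a (i+1) (by omega) (by omega)]
          rw [(IH (cs.length - (i+1)) (by omega)).2 (i+1) a rfl]
          have hne2 : ¬ cs.getD (i+1) ' ' = cs.getD (i+1-1) ' ' := by
            simp only [Nat.add_sub_cancel]
            exact fun he => hd he.symm
          conv_rhs => rw [pvBLoop]
          rw [if_pos (show i + 1 < cs.length by omega), if_neg hne2]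
          exact pvBLoop_fuel cs ts (cs.length + 1) cs.length (i+1+1) none a (by omega) (by omega)
      · rw [if_neg hi]
        rw [pvBLoop, if_neg (show ¬ (i+1 < cs.length) by omega)]

-- ===== VERDICT (by name: the statement is the Claim_ definition above) =====
theorem minCost_spec : Claim_equal_minCost := by
  intro colors neededTime _ _
  unfold Spec_minCost minCost minCost_alt
  rw [pvOuter_fuel colors.toList neededTime colors.toList.length (colors.toList.length + 1) 0 0 (by omega) (by omega)]
  rw [pvBLoop_fuel colors.toList neededTime colors.toList.length (colors.toList.length + 1) 1 none 0 (by omega) (by omega)]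
  exact (pvMainAux colors.toList neededTime (colors.toList.length - 0)).2 0 0 rfl
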